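-- pv_equiv track=rewrite | github.com/pypi-data/pypi-mirror-341 | packages/maleo-core/maleo_core-0.4.10-py3-none-any.whl/maleo_core/utils/serializer.py | build_nested_expand_structure
-- ===== SOURCE A (Python) =====
-- from collections import defaultdict
--
-- def build_nested_expand_structure(expand:set[str]) -> dict[str, set[str]]:
--     """
--     Turn set like {'profile.gender', 'user_type'} into:
--     {
--         'profile': {'gender'},
--         'user_type': set()
--     }
--     """
--     nested = defaultdict(set)
--     for item in expand:
--         if "." in item:
--             parent, child = item.split(".", 1)
--             nested[parent].add(child)
--         else:
--             nested[item]  #* empty set means expand whole field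
--     return nested
-- ===== SOURCE B (Python) =====
-- def build_nested_expand_structure(expand):
--     # Two-pass alternative: collect parent keys in first-occurrence order,
--     # then gather each parent's children by scanning the input per parent.
--     parents = []
--     for item in expand:
--         p = item.split(".", 1)[0]
--         if p not in parents:
--             parents.append(p)
--     result = {}
--     for p in parents:
--         children = []
--         for item in expand:
--             if "." in item:
--                 head, tail = item.split(".", 1)
--                 if head == p and tail not in children:
--                     children.append(tail)
--         result[p] = set(children)
--     return result
-- ===== Notes on version B (the rewrite author's own statement) =====
-- stated objective: alternative
-- what changed: Replaces A's single-pass defaultdict(set) hash grouping with a two-pass algorithm: first collect the parent keys in first-occurrence order, then gather each parent's children by a direct per-parent scan of the input, with no dict-based grouping.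
import Mathlib
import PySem

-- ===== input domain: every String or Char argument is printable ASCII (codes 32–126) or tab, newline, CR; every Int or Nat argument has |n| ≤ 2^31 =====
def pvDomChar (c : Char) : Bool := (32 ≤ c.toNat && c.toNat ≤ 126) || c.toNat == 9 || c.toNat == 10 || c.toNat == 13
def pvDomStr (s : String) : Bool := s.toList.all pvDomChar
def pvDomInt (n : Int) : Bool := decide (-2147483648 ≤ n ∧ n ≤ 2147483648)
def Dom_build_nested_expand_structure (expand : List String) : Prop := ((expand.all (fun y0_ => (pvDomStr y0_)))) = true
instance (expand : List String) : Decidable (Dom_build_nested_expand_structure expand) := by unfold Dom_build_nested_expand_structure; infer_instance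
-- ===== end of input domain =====

-- B replaces A's one-pass defaultdict(set) grouping by a two-pass algorithm (collect parent keys in
-- first-occurrence order, then gather each parent's children by a per-parent scan); same return value.

-- ===== PORT A =====
-- the body of A's 'for item in expand' loop over the defaultdict(set)
def pvStepA (nested : PySem.Dict String (PySem.Set String)) (item : String) :
    PySem.Dict String (PySem.Set String) :=
  if PySem.Str.isIn "." item then
    match PySem.Str.splitMax? item "." 1 with
    | some [parent, child] => nested.modify parent [] (fun s => PySem.Set.add s child)
    | _ => nested  -- unreachable: split(".", 1) on a string containing "." yields exactly two parts
  else
    nested.setdefault item []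

def build_nested_expand_structure (expand : List String) : List (String × List String) :=
  (expand.foldl pvStepA PySem.Dict.empty).items

-- ===== PORT B =====
-- item.split(".", 1)[0]
def pvParentOf (item : String) : String :=
  match PySem.Str.splitMax? item "." 1 with
  | some (p :: _) => p
  | _ => item  -- unreachable: split never returns an empty list

-- the body of B's inner 'for item in expand' loop collecting the children of p
def pvChildStep (p : String) (children : List String) (item : String) : List String :=
  if PySem.Str.isIn "." item then
    match PySem.Str.splitMax? item "." 1 with
    | some [head, tail] =>
        if head = p ∧ tail ∉ children then children ++ [tail] else children
    | _ => children
  else children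

def build_nested_expand_structure_alt (expand : List String) : List (String × List String) :=
  let parents := expand.foldl (fun ps item =>
      let p := pvParentOf item
      if p ∈ ps then ps else ps ++ [p]) []
  parents.map (fun p => (p, PySem.Set.ofList (expand.foldl (pvChildStep p) [])))

-- ===== PRECONDITION & SPEC =====
def Spec_build_nested_expand_structure (expand : List String) (out : List (String × List String)) : Prop := out = build_nested_expand_structure_alt expand
instance (expand : List String) (out : List (String × List String)) : Decidable (Spec_build_nested_expand_structure expand out) := by unfold Spec_build_nested_expand_structure; infer_instance

-- ===== CLAIM (what is proved, stated in full; the proofs are below) =====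
def Claim_equal_build_nested_expand_structure : Prop := ∀ (expand : List String), Dom_build_nested_expand_structure expand → Spec_build_nested_expand_structure expand (build_nested_expand_structure expand)

-- ===== LEMMAS AND PROOFS =====
theorem pv_go_zero (l : List Char) (fuel : Nat) (cur : List Char) (acc : List (List Char))
    (hf : 0 < fuel) :
    PySem.Chars.splitOnMax.go ['.'] fuel 0 l cur acc = ((cur.reverse ++ l) :: acc).reverse := by
  cases fuel with
  | zero => omega
  | succ f => cases l <;> simp [PySem.Chars.splitOnMax.go]

theorem pv_go_one (l : List Char) : ∀ (fuel : Nat) (cur : List Char) (acc : List (List Char)),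
    l.length < fuel →
    PySem.Chars.splitOnMax.go ['.'] fuel 1 l cur acc =
      (if '.' ∈ l then
        ((l.dropWhile (· ≠ '.')).tail :: (cur.reverse ++ l.takeWhile (· ≠ '.')) :: acc).reverse
      else ((cur.reverse ++ l) :: acc).reverse) := by
  induction l with
  | nil => intro fuel cur acc hf
           cases fuel with
           | zero => omega
           | succ f => simp [PySem.Chars.splitOnMax.go]
  | cons c rest ih =>
      intro fuel cur acc hf
      cases fuel with
      | zero => simp at hf
      | succ f =>
        by_cases hc : c = '.'
        · subst hc
          have hrest : rest.length < f := by simp at hf; omega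
          simp [PySem.Chars.splitOnMax.go, List.isPrefixOf]
          rw [pv_go_zero rest f [] _ (by omega)]
          simp
        · have hrest : rest.length < f := by simp at hf; omega
          have hc' : ¬ (('.':Char) = c) := fun h => hc h.symm
          have hpre : (['.'] : List Char).isPrefixOf (c :: rest) = false := by
            simp [List.isPrefixOf, hc']
          simp only [PySem.Chars.splitOnMax.go, hpre, if_neg (by omega : ¬ (1 : Nat) = 0), Bool.false_eq_true, if_false]
          rw [ih f (c :: cur) acc hrest]
          by_cases hm : '.' ∈ rest
          · simp [hm, hc, hc', List.dropWhile, List.takeWhile]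
          · simp [hm, hc, hc', List.dropWhile, List.takeWhile]

theorem pv_singleton_infix (l : List Char) : (['.'] : List Char) <:+: l ↔ '.' ∈ l := by
  constructor
  · intro h
    exact h.sublist.subset (by simp)
  · intro h
    obtain ⟨s, t, rfl⟩ := List.append_of_mem h
    exact ⟨s, t, by simp⟩

theorem pv_split_no_dot (s : String) (h : PySem.Str.isIn "." s = false) :
    PySem.Str.splitMax? s "." 1 = some [s] := by
  have hmem : '.' ∉ s.toList := by
    intro hm
    have ht : PySem.Str.isIn "." s = true :=
      (PySem.Str.isIn_iff_infix "." s).mpr (by simpa using (pv_singleton_infix s.toList).mpr hm)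
    rw [ht] at h
    exact absurd h (by simp)
  simp [PySem.Str.splitMax?, PySem.Chars.splitMax?, PySem.Chars.splitOnMax]
  rw [pv_go_one _ _ _ _ (by simp)]
  simp [hmem]

theorem pv_split_dot (s : String) (h : PySem.Str.isIn "." s = true) :
    PySem.Str.splitMax? s "." 1 =
      some [String.ofList (s.toList.takeWhile (· ≠ '.')),
            String.ofList ((s.toList.dropWhile (· ≠ '.')).tail)] := by
  have hmem : '.' ∈ s.toList := by
    rw [← pv_singleton_infix]
    rw [PySem.Str.isIn_iff_infix] at h
    simpa using h
  simp [PySem.Str.splitMax?, PySem.Chars.splitMax?, PySem.Chars.splitOnMax]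
  rw [pv_go_one _ _ _ _ (by simp)]
  simp [hmem]

theorem pv_parentOf_no_dot (s : String) (h : PySem.Str.isIn "." s = false) :
    pvParentOf s = s := by
  simp [pvParentOf, pv_split_no_dot s h]

theorem pv_split_dot' (s : String) (h : PySem.Str.isIn "." s = true) :
    ∃ a b, PySem.Str.splitMax? s "." 1 = some [a, b] ∧ pvParentOf s = a :=
  ⟨_, _, pv_split_dot s h, by simp [pvParentOf, pv_split_dot s h]⟩

theorem pv_keys_step (d : PySem.Dict String (PySem.Set String)) (item : String) :
    (pvStepA d item).keys =
      if pvParentOf item ∈ d.keys then d.keys else d.keys ++ [pvParentOf item] := by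
  by_cases hdot : PySem.Str.isIn "." item = true
  · obtain ⟨a, b, hs, hpa⟩ := pv_split_dot' item hdot
    simp only [pvStepA, hdot, if_true, hs, hpa]
    rw [PySem.Dict.keys_modify]
    by_cases hk : d.contains a = true
    · rw [PySem.Dict.keys_insert_of_contains _ _ hk,
        if_pos ((PySem.Dict.contains_iff_mem_keys _ _).mp hk)]
    · rw [PySem.Dict.keys_insert_of_not_contains _ _ (Bool.eq_false_iff.mpr hk),
        if_neg (fun hm => hk ((PySem.Dict.contains_iff_mem_keys _ _).mpr hm))]
  · have hdot' : PySem.Str.isIn "." item = false := Bool.eq_false_iff.mpr hdot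
    simp only [pvStepA, hdot', Bool.false_eq_true, if_false,
      pv_parentOf_no_dot item hdot']
    rw [PySem.Dict.keys_setdefault]
    by_cases hk : d.contains item = true
    · rw [if_pos hk, if_pos ((PySem.Dict.contains_iff_mem_keys _ _).mp hk)]
    · rw [if_neg hk, if_neg (fun hm => hk ((PySem.Dict.contains_iff_mem_keys _ _).mpr hm))]

theorem pv_getD_step (d : PySem.Dict String (PySem.Set String)) (item p : String) :
    (pvStepA d item).getD p [] = pvChildStep p (d.getD p []) item := by
  by_cases hdot : PySem.Str.isIn "." item = true
  · obtain ⟨a, b, hs, hpa⟩ := pv_split_dot' item hdot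
    simp only [pvStepA, pvChildStep, hdot, if_true, hs]
    rw [PySem.Dict.getD_modify]
    by_cases hp : p = a
    · rw [if_pos hp, hp, PySem.Set.add_eq_ite]
      by_cases hmem : b ∈ d.getD a []
      · rw [if_pos hmem, if_neg (by simp [hmem])]
      · rw [if_neg hmem, if_pos ⟨rfl, hmem⟩]
    · rw [if_neg hp, if_neg (by rintro ⟨rfl, -⟩; exact hp rfl)]
  · have hdot' : PySem.Str.isIn "." item = false := Bool.eq_false_iff.mpr hdot
    simp only [pvStepA, pvChildStep, hdot', Bool.false_eq_true, if_false]
    by_cases hp : p = item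
    · subst hp
      exact PySem.Dict.getD_setdefault_self d p [] []
    · rw [PySem.Dict.getD_eq_get?_getD, PySem.Dict.get?_setdefault_of_ne d _ hp,
        ← PySem.Dict.getD_eq_get?_getD]

theorem pv_keys_foldl (xs : List String) : ∀ (d : PySem.Dict String (PySem.Set String)),
    (xs.foldl pvStepA d).keys =
      xs.foldl (fun ps item =>
        let p := pvParentOf item
        if p ∈ ps then ps else ps ++ [p]) d.keys := by
  induction xs with
  | nil => intro d; rfl
  | cons x rest ih =>
      intro d
      simp only [List.foldl_cons]
      rw [ih (pvStepA d x), pv_keys_step]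

theorem pv_getD_foldl (xs : List String) : ∀ (d : PySem.Dict String (PySem.Set String)) (p : String),
    (xs.foldl pvStepA d).getD p [] = xs.foldl (pvChildStep p) (d.getD p []) := by
  induction xs with
  | nil => intro d p; rfl
  | cons x rest ih =>
      intro d p
      simp only [List.foldl_cons]
      rw [ih (pvStepA d x) p, pv_getD_step]

theorem pv_parents_nodup (xs : List String) : ∀ (ps : List String), ps.Nodup →
    (xs.foldl (fun ps item =>
      let p := pvParentOf item
      if p ∈ ps then ps else ps ++ [p]) ps).Nodup := by
  induction xs with
  | nil => intro ps h; exact h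
  | cons x rest ih =>
      intro ps h
      simp only [List.foldl_cons]
      apply ih
      by_cases hm : pvParentOf x ∈ ps
      · simpa [hm] using h
      · simp only [hm, if_false]
        simp [List.nodup_append, h]
        exact fun a ha he => hm (he ▸ ha)

theorem pv_childstep_nodup (p : String) (cs : List String) (item : String) (h : cs.Nodup) :
    (pvChildStep p cs item).Nodup := by
  unfold pvChildStep
  split
  · split
    · split
      · rename_i hcond
        simp [List.nodup_append, h]
        exact fun a ha he => hcond.2 (he ▸ ha)
      · exact h
    · exact h
  · exact h

theorem pv_children_nodup (xs : List String) : ∀ (cs : List String) (p : String), cs.Nodup →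
    (xs.foldl (pvChildStep p) cs).Nodup := by
  induction xs with
  | nil => intro cs p h; exact h
  | cons x rest ih =>
      intro cs p h
      simp only [List.foldl_cons]
      exact ih _ p (pv_childstep_nodup p cs x h)

theorem pv_main (expand : List String) :
    build_nested_expand_structure expand = build_nested_expand_structure_alt expand := by
  unfold build_nested_expand_structure build_nested_expand_structure_alt
  have hkeys := pv_keys_foldl expand PySem.Dict.empty
  rw [PySem.Dict.keys_empty] at hkeys
  have hnd : (expand.foldl pvStepA PySem.Dict.empty).keys.Nodup := by
    rw [hkeys]; exact pv_parents_nodup expand [] List.nodup_nil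
  rw [PySem.Dict.items_eq_map_keys _ hnd ([] : PySem.Set String), hkeys]
  apply List.map_congr_left
  intro p _
  rw [pv_getD_foldl expand PySem.Dict.empty p, PySem.Dict.getD_empty,
    PySem.Set.ofList_eq_self_of_nodup _ (pv_children_nodup expand [] p List.nodup_nil)]

-- ===== VERDICT (by name: the statement is the Claim_ definition above) =====
theorem build_nested_expand_structure_spec : Claim_equal_build_nested_expand_structure := by
  intro expand _
  unfold Spec_build_nested_expand_structure
  exact pv_main expand
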